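-- pv_equiv track=rewrite | github.com/mf-rl/mod_management_tools | organize_files_by_author.py | extract_display_prefix
-- ===== SOURCE A (Python) =====
-- from typing import Dict, List, Optional, Sequence, Tuple
--
-- def extract_display_prefix(original_stem: str, normalized_prefix: str) -> str:
--     if not normalized_prefix:
--         return ""
--
--     collected_raw: List[str] = []
--     collected_norm: List[str] = []
--
--     for character in original_stem:
--         if not character.isalnum():
--             continue
--
--         collected_raw.append(character)
--         collected_norm.append(character.lower())
--
--         if "".join(collected_norm) == normalized_prefix:
--             break
--
--     return "".join(collected_raw)
-- ===== SOURCE B (Python) =====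
-- def extract_display_prefix(original_stem: str, normalized_prefix: str) -> str:
--     raw = [c for c in original_stem if c.isalnum()]
--     L = len(normalized_prefix)
--     if L <= len(raw) and "".join(raw[:L]).lower() == normalized_prefix:
--         return "".join(raw[:L])
--     return "".join(raw)
-- ===== Notes on version B (the rewrite author's own statement) =====
-- stated objective: faster
-- what changed: Replaces A's incremental accumulate-and-rejoin-per-character loop (which re-joins the growing accumulator on every step) by one filtering pass plus a single slice comparison against the normalized prefix.
import Mathlib
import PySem

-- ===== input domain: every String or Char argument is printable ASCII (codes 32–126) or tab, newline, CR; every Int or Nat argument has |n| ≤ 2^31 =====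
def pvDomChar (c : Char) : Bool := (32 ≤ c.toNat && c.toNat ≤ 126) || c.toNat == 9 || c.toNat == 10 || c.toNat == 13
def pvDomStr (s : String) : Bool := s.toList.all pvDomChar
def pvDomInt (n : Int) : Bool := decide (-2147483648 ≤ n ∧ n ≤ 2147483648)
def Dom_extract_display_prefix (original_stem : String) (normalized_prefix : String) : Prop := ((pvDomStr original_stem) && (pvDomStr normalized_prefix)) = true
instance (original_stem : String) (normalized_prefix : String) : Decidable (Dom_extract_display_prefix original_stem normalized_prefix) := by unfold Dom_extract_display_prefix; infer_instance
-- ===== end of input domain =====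

-- B replaces A's incremental accumulate-and-compare loop with one filtering pass plus a
-- single slice comparison (objective: faster — no per-step re-join of the accumulator).

-- ===== PORT A =====
-- the loop over the stem's characters, carrying collected_raw and collected_norm
def pvLoopA (pfx : List Char) : List Char → List Char → List Char → List Char
  | [], raw, _ => raw
  | c :: cs, raw, norm =>
    if PySem.Chars.isalnum c = false then pvLoopA pfx cs raw norm
    else
      let raw' := raw ++ [c]
      let norm' := norm ++ [PySem.Chars.lowerChar c]
      if norm' = pfx then raw' else pvLoopA pfx cs raw' norm'

def extract_display_prefix (original_stem : String) (normalized_prefix : String) : String :=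
  if normalized_prefix.toList = [] then ""
  else String.ofList (pvLoopA normalized_prefix.toList original_stem.toList [] [])

-- ===== PORT B =====
def extract_display_prefix_alt (original_stem : String) (normalized_prefix : String) : String :=
  let raw := original_stem.toList.filter (fun c => PySem.Chars.isalnum c)
  let L := normalized_prefix.toList.length
  if L ≤ raw.length ∧ (raw.take L).map PySem.Chars.lowerChar = normalized_prefix.toList then
    String.ofList (raw.take L)
  else String.ofList raw

-- ===== PRECONDITION & SPEC =====
def Spec_extract_display_prefix (original_stem : String) (normalized_prefix : String) (out : String) : Prop := out = extract_display_prefix_alt original_stem normalized_prefix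
instance (original_stem : String) (normalized_prefix : String) (out : String) : Decidable (Spec_extract_display_prefix original_stem normalized_prefix out) := by unfold Spec_extract_display_prefix; infer_instance

-- ===== CLAIM (what is proved, stated in full; the proofs are below) =====
def Claim_equal_extract_display_prefix : Prop := ∀ (original_stem : String) (normalized_prefix : String), Dom_extract_display_prefix original_stem normalized_prefix → Spec_extract_display_prefix original_stem normalized_prefix (extract_display_prefix original_stem normalized_prefix)

-- ===== LEMMAS AND PROOFS =====

-- characterisation of A's loop: with consistent state and no earlier match, it returns
-- the first L filtered chars when their lowering equals the prefix, else all of them.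
theorem pvLoopA_char (pfx : List Char) (cs : List Char) :
    ∀ raw : List Char,
      (raw.length < pfx.length ∨ (raw.take pfx.length).map PySem.Chars.lowerChar ≠ pfx) →
      pvLoopA pfx cs raw (raw.map PySem.Chars.lowerChar) =
        (let full := raw ++ cs.filter (fun c => PySem.Chars.isalnum c)
         if pfx.length ≤ full.length ∧ (full.take pfx.length).map PySem.Chars.lowerChar = pfx
         then full.take pfx.length else full) := by
  induction cs with
  | nil =>
    intro raw hinv
    simp only [pvLoopA, List.filter_nil, List.append_nil]
    rcases hinv with h | h
    · rw [if_neg]; omega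
    · rw [if_neg]; tauto
  | cons c cs ih =>
    intro raw hinv
    by_cases hal : PySem.Chars.isalnum c = true
    · rw [show pvLoopA pfx (c :: cs) raw (raw.map PySem.Chars.lowerChar)
          = if raw.map PySem.Chars.lowerChar ++ [PySem.Chars.lowerChar c] = pfx
            then raw ++ [c]
            else pvLoopA pfx cs (raw ++ [c])
                   (raw.map PySem.Chars.lowerChar ++ [PySem.Chars.lowerChar c]) from by
            simp [pvLoopA, hal]]
      rw [show (c :: cs).filter (fun c => PySem.Chars.isalnum c)
          = c :: cs.filter (fun c => PySem.Chars.isalnum c) from List.filter_cons_of_pos hal]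
      have hmap' : (raw ++ [c]).map PySem.Chars.lowerChar
          = raw.map PySem.Chars.lowerChar ++ [PySem.Chars.lowerChar c] := by simp
      have hsplit : raw ++ c :: cs.filter (fun c => PySem.Chars.isalnum c)
          = (raw ++ [c]) ++ cs.filter (fun c => PySem.Chars.isalnum c) := by simp
      by_cases hm : raw.map PySem.Chars.lowerChar ++ [PySem.Chars.lowerChar c] = pfx
      · rw [if_pos hm]
        have hlenr : (raw ++ [c]).length = pfx.length := by
          have := congrArg List.length hm; simp at this; simp; omega
        have htake : ((raw ++ [c]) ++ cs.filter (fun c => PySem.Chars.isalnum c)).take pfx.length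
            = raw ++ [c] := by rw [← hlenr, List.take_left]
        simp only [hsplit, htake]
        rw [if_pos]
        constructor
        · simp [← hlenr]
        · rw [hmap', hm]
      · rw [if_neg hm]
        have hinv' : ((raw ++ [c]).length < pfx.length ∨
            ((raw ++ [c]).take pfx.length).map PySem.Chars.lowerChar ≠ pfx) := by
          rcases Nat.lt_trichotomy (raw ++ [c]).length pfx.length with h1 | h1 | h1
          · exact Or.inl h1
          · right
            rw [← h1, List.take_length, hmap']
            exact hm
          · right
            have hlen : pfx.length ≤ raw.length := by simp at h1; omega
            rw [List.take_append_of_le_length hlen]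
            rcases hinv with h2 | h2
            · omega
            · exact h2
        have := ih (raw ++ [c]) hinv'
        rw [hmap'] at this
        rw [this, hsplit]
    · simp only [Bool.not_eq_true] at hal
      rw [show pvLoopA pfx (c :: cs) raw (raw.map PySem.Chars.lowerChar)
          = pvLoopA pfx cs raw (raw.map PySem.Chars.lowerChar) from by simp [pvLoopA, hal]]
      rw [show (c :: cs).filter (fun c => PySem.Chars.isalnum c)
          = cs.filter (fun c => PySem.Chars.isalnum c) from List.filter_cons_of_neg (by simp [hal])]
      exact ih raw hinv

-- zeta-expanded form of B's port (definitional)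
theorem pvAlt_eq (s p : String) : extract_display_prefix_alt s p =
    if p.toList.length ≤ (s.toList.filter (fun c => PySem.Chars.isalnum c)).length ∧
        ((s.toList.filter (fun c => PySem.Chars.isalnum c)).take p.toList.length).map
          PySem.Chars.lowerChar = p.toList
    then String.ofList ((s.toList.filter (fun c => PySem.Chars.isalnum c)).take p.toList.length)
    else String.ofList (s.toList.filter (fun c => PySem.Chars.isalnum c)) := rfl

theorem extract_display_prefix_spec : Claim_equal_extract_display_prefix := by
  intro s p _
  unfold Spec_extract_display_prefix extract_display_prefix
  rw [pvAlt_eq]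
  by_cases hp : p.toList = []
  · rw [if_pos hp]
    have hL : p.toList.length = 0 := by simp [hp]
    rw [if_pos ⟨by omega, by simp [hp]⟩, hL]
    rfl
  · rw [if_neg hp]
    have hL : 0 < p.toList.length := List.length_pos_iff.mpr hp
    have h := pvLoopA_char p.toList s.toList [] (by left; simpa using hL)
    simp only [List.map_nil, List.nil_append] at h
    rw [h]
    rw [apply_ite String.ofList]
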